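-- pv_equiv track=rewrite | github.com/vpokludova/projects | mapf_combined_solver/source/subproblem.py | rank_neighbors
-- ===== SOURCE A (Python) =====
-- def rank_neighbors(next_pos, all_neighbors, conflict_path):
--     distances = {}
--     x2 = next_pos[0]
--     y2 = next_pos[1]
--     for n in all_neighbors:
--         x1 = n[0]
--         y1 = n[1]
--         d = abs(x2 - x1) + abs(y2 - y1)
--         if d in distances.keys():
--             distances[d].append(n)
--         else:
--             distances[d] = [n]
--     sorted_distances = sorted(distances.keys())
--     ranked_neighbors = []
--     while len(ranked_neighbors) < 2 and len(distances) > 0: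
--         d = sorted_distances[0]
--         n = distances[d].pop(0)
--         if n not in conflict_path:
--             ranked_neighbors.append(n)
--         if len(distances[d]) == 0:
--             distances.pop(d)
--             sorted_distances.remove(d)
--     return ranked_neighbors
-- ===== SOURCE B (Python) =====
-- def rank_neighbors(next_pos, all_neighbors, conflict_path):
--     blocked = set(conflict_path)
--     key = lambda n: abs(next_pos[0] - n[0]) + abs(next_pos[1] - n[1])
--     ranked_neighbors = []
--     for n in sorted(all_neighbors, key=key):
--         if n not in blocked:
--             ranked_neighbors.append(n)
--             if len(ranked_neighbors) == 2:
--                 break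
--     return ranked_neighbors
-- ===== Notes on version B (the rewrite author's own statement) =====
-- stated objective: simpler
-- what changed: Replaces A's distance-keyed bucket dict, sorted key list and draining while-loop (with pop(0), dict.pop and list.remove bookkeeping) by one stable sort of the neighbors by Manhattan distance followed by a single early-exit scan, with the conflict-path membership test done against a set instead of a list.
import Mathlib
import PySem

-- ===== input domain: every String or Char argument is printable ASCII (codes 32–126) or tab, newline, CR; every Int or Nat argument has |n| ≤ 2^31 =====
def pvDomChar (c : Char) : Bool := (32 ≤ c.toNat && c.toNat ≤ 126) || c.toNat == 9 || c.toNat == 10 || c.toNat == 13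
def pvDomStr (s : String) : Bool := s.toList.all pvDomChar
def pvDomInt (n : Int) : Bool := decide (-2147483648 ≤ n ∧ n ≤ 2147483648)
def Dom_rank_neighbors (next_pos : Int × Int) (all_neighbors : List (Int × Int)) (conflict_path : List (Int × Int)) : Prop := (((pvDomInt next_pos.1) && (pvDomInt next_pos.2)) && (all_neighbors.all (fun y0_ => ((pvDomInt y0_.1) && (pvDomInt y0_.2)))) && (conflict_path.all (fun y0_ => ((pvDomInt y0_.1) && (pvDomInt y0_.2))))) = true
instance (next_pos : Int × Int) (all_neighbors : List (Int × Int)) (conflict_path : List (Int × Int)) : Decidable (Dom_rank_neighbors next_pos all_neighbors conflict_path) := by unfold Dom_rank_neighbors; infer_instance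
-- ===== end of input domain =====

-- B replaces A's distance-bucket dict and draining while-loop by one stable sort by Manhattan
-- distance followed by a single early-exit scan (objective: simpler; with a set for the conflict test).


-- ===== PORT A =====
-- the first for loop of A: bucket the neighbors by Manhattan distance
-- ('distances[d].append(n)' is the in-place read–append–overwrite, ported as insert of getD ++ [n])
def pvBuildA (next_pos : Int × Int) (all_neighbors : List (Int × Int)) :
    PySem.Dict Int (List (Int × Int)) :=
  all_neighbors.foldl
    (fun distances n =>
      let d := |next_pos.1 - n.1| + |next_pos.2 - n.2|
      if distances.contains d then distances.insert d (distances.getD d [] ++ [n])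
      else distances.insert d [n])
    PySem.Dict.empty

-- the while loop of A; fuel only makes the recursion structural (the loop removes one element
-- per iteration, so all_neighbors.length iterations always suffice); the three defensive
-- returns are unreachable in Python (they would be IndexError/KeyError on an empty structure)
def pvLoopA (conflict_path : List (Int × Int)) :
    Nat → List Int → PySem.Dict Int (List (Int × Int)) → List (Int × Int) → List (Int × Int)
  | 0, _, _, ranked => ranked
  | fuel + 1, sorted_distances, distances, ranked =>
    if ranked.length < 2 ∧ 0 < distances.items.length then
      match sorted_distances with
      | [] => ranked
      | d :: _ =>
        match distances.get? d with
        | none => ranked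
        | some bucket =>
          match bucket with
          | [] => ranked
          | n :: rest =>
            let ranked' := if n ∈ conflict_path then ranked else ranked ++ [n]
            if rest.length = 0 then
              pvLoopA conflict_path fuel ((PySem.List.remove? sorted_distances d).getD sorted_distances)
                (distances.erase d) ranked'
            else
              pvLoopA conflict_path fuel sorted_distances (distances.insert d rest) ranked'
    else ranked

def rank_neighbors (next_pos : Int × Int) (all_neighbors : List (Int × Int)) (conflict_path : List (Int × Int)) : List (Int × Int) :=
  let distances := pvBuildA next_pos all_neighbors
  let sorted_distances := PySem.List.sorted distances.keys (fun k => k) false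
  pvLoopA conflict_path all_neighbors.length sorted_distances distances []

-- ===== PORT B =====
-- single early-exit scan over the stably sorted neighbor list
def pvLoopB (blocked : PySem.Set (Int × Int)) :
    List (Int × Int) → List (Int × Int) → List (Int × Int)
  | ranked, [] => ranked
  | ranked, n :: rest =>
    if PySem.Set.contains blocked n then pvLoopB blocked ranked rest
    else
      let r := ranked ++ [n]
      if r.length = 2 then r else pvLoopB blocked r rest

def rank_neighbors_alt (next_pos : Int × Int) (all_neighbors : List (Int × Int)) (conflict_path : List (Int × Int)) : List (Int × Int) :=
  let blocked := PySem.Set.ofList conflict_path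
  pvLoopB blocked []
    (PySem.List.sorted all_neighbors (fun n => |next_pos.1 - n.1| + |next_pos.2 - n.2|) false)

-- ===== PRECONDITION & SPEC =====
def Spec_rank_neighbors (next_pos : Int × Int) (all_neighbors : List (Int × Int)) (conflict_path : List (Int × Int)) (out : List (Int × Int)) : Prop := out = rank_neighbors_alt next_pos all_neighbors conflict_path
instance (next_pos : Int × Int) (all_neighbors : List (Int × Int)) (conflict_path : List (Int × Int)) (out : List (Int × Int)) : Decidable (Spec_rank_neighbors next_pos all_neighbors conflict_path out) := by unfold Spec_rank_neighbors; infer_instance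

-- ===== CLAIM (what is proved, stated in full; the proofs are below) =====
def Claim_equal_rank_neighbors : Prop := ∀ (next_pos : Int × Int) (all_neighbors : List (Int × Int)) (conflict_path : List (Int × Int)), Dom_rank_neighbors next_pos all_neighbors conflict_path → Spec_rank_neighbors next_pos all_neighbors conflict_path (rank_neighbors next_pos all_neighbors conflict_path)

-- ===== LEMMAS AND PROOFS =====

def pvFib (key : Int × Int → Int) (xs : List (Int × Int)) (k : Int) : List (Int × Int) :=
  xs.filter (fun n => key n == k)

def pvStep (key : Int × Int → Int) (d : PySem.Dict Int (List (Int × Int))) (n : Int × Int) :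
    PySem.Dict Int (List (Int × Int)) :=
  let k := key n
  if d.contains k then d.insert k (d.getD k [] ++ [n]) else d.insert k [n]

def pvFlatten (sd : List Int) (d : PySem.Dict Int (List (Int × Int))) : List (Int × Int) :=
  sd.flatMap (fun k => d.getD k [])

theorem pvInsertBy_cons (b : Int × Int → Int × Int → Bool) (x y : Int × Int) (ys : List (Int × Int)) :
    PySem.List.insertBy b x (y :: ys) =
      if b x y then x :: y :: ys else y :: PySem.List.insertBy b x ys := by
  simp [PySem.List.insertBy]

theorem pvInsertBy_split (b : Int × Int → Int × Int → Bool) (x : Int × Int)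
    (P Q : List (Int × Int)) (hP : ∀ y ∈ P, b x y = false)
    (hQ : Q = [] ∨ ∃ q t, Q = q :: t ∧ b x q = true) :
    PySem.List.insertBy b x (P ++ Q) = P ++ x :: Q := by
  induction P with
  | nil =>
    rcases hQ with rfl | ⟨q, t, rfl, hq⟩
    · simp [PySem.List.insertBy]
    · simp [pvInsertBy_cons, hq]
  | cons p P ih =>
    have hp := hP p (by simp)
    simp only [List.cons_append, pvInsertBy_cons, hp, Bool.false_eq_true]
    simp [ih (fun y hy => hP y (by simp [hy]))]

theorem pvGet?_erase_of_ne (d : PySem.Dict Int (List (Int × Int))) (k k' : Int) (h : k' ≠ k) :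
    (d.erase k).get? k' = d.get? k' := by
  obtain ⟨l⟩ := d
  simp only [PySem.Dict.erase, PySem.Dict.get?]
  have hpred : (fun (a : Int × List (Int × Int)) => (!decide (a.1 = k) && decide (a.1 = k'))) = (fun a => decide (a.1 = k')) := by
    funext a
    by_cases h1 : a.1 = k'
    · simp [h1, h]
    · simp [h1]
  have hpred2 : (fun (p : Int × List (Int × Int)) => p.1 == k') = (fun p => decide (p.1 = k')) :=
    funext fun a => Bool.beq_eq_decide_eq a.1 k'
  simp [List.find?_filter, hpred, hpred2]

theorem pvItems_ne_nil_of_get? (d : PySem.Dict Int (List (Int × Int))) (k : Int)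
    (b : List (Int × Int)) (h : d.get? k = some b) : 0 < d.items.length := by
  obtain ⟨l⟩ := d
  cases l with
  | nil => simp [PySem.Dict.get?] at h
  | cons p t => simp

theorem pvRemove?_cons_self (k : Int) (t : List Int) :
    PySem.List.remove? (k :: t) k = some t := by
  simp [PySem.List.remove?, List.idxOf?_cons]

theorem pvFlatten_congr (sd : List Int) (d d' : PySem.Dict Int (List (Int × Int)))
    (h : ∀ k ∈ sd, d.getD k [] = d'.getD k []) : pvFlatten sd d = pvFlatten sd d' := by
  unfold pvFlatten
  exact List.flatMap_congr h

theorem pvContains_of_items (d : PySem.Dict Int (List (Int × Int))) (K : List Int)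
    (f : Int → List (Int × Int)) (h : d.items = K.map (fun k => (k, f k))) (k0 : Int) :
    d.contains k0 = decide (k0 ∈ K) := by
  simp only [PySem.Dict.contains, h, List.any_map]
  by_cases hk : k0 ∈ K
  · simp only [hk, decide_true]
    simp only [List.any_eq_true]
    exact ⟨k0, hk, by simp⟩
  · simp only [hk, decide_false]
    refine List.any_eq_false.mpr ?_
    intro x hx
    simp only [Function.comp_def, beq_iff_eq]
    exact fun he => hk (he ▸ hx)

theorem pvGet?_of_items (d : PySem.Dict Int (List (Int × Int))) (K : List Int)
    (f : Int → List (Int × Int)) (h : d.items = K.map (fun k => (k, f k))) (hnd : K.Nodup)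
    (k0 : Int) (hk : k0 ∈ K) : d.get? k0 = some (f k0) := by
  apply PySem.Dict.get?_of_mem_items
  · rw [h]; exact List.mem_map.2 ⟨k0, hk, rfl⟩
  · simpa [PySem.Dict.keys, h, List.map_map, Function.comp_def] using hnd

theorem pvBuild_items (key : Int × Int → Int) (xs : List (Int × Int)) :
    (xs.foldl (pvStep key) PySem.Dict.empty).items =
      (PySem.Set.ofList (xs.map key)).map (fun k => (k, pvFib key xs k)) := by
  induction xs using List.reverseRecOn with
  | nil => rfl
  | append_singleton xs x ih =>
    rw [List.foldl_append]
    simp only [List.foldl_cons, List.foldl_nil]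
    set D := xs.foldl (pvStep key) PySem.Dict.empty with hD
    set K := PySem.Set.ofList (xs.map key) with hK
    have hridx : PySem.Set.ofList ((xs ++ [x]).map key) = K.add (key x) := by
      rw [List.map_append]; exact PySem.Set.ofList_append_singleton _ _
    have hfib : ∀ k, pvFib key (xs ++ [x]) k =
        pvFib key xs k ++ (if key x = k then [x] else []) := by
      intro k
      simp only [pvFib, List.filter_append, List.filter_cons, List.filter_nil]
      split <;> simp_all
    have hcont : D.contains (key x) = decide (key x ∈ K) := pvContains_of_items D K _ ih (key x)
    by_cases hmem : key x ∈ K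
    · have : D.contains (key x) = true := by rw [hcont]; simp [hmem]
      rw [pvStep, if_pos this]
      rw [PySem.Dict.items_insert_of_contains D _ this]
      rw [ih, hridx, PySem.Set.add_of_mem hmem, List.map_map]
      apply List.map_congr_left
      intro k hk
      by_cases hkx : k = key x
      · subst hkx
        have hgd : D.getD (key x) [] = pvFib key xs (key x) := by
          simp [PySem.Dict.getD, pvGet?_of_items D K _ ih (PySem.Set.nodup_ofList _) (key x) hmem]
        simp [Function.comp, hgd, hfib]
      · simp [Function.comp, hfib, hkx, Ne.symm hkx]
    · have : D.contains (key x) = false := by rw [hcont]; simp [hmem]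
      rw [pvStep, if_neg (by simp [this])]
      rw [PySem.Dict.items_insert_of_not_contains D _ this]
      rw [ih, hridx, PySem.Set.add_of_not_mem hmem, List.map_append]
      congr 1
      · apply List.map_congr_left
        intro k hk
        have hkx : ¬ key x = k := fun he => hmem (he ▸ hk)
        simp [hfib, hkx]
      · have hfx : pvFib key xs (key x) = [] := by
          simp only [pvFib, List.filter_eq_nil_iff]
          intro a ha
          simp only [beq_iff_eq]
          intro he
          exact hmem (hK ▸ (PySem.Set.mem_ofList _ _).2 (List.mem_map.2 ⟨a, ha, he⟩))
        simp [hfib, hfx]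

theorem pvKey_of_mem_fib (key : Int × Int → Int) (xs : List (Int × Int)) (k : Int)
    (y : Int × Int) (h : y ∈ pvFib key xs k) : key y = k := by
  simp only [pvFib, List.mem_filter, beq_iff_eq] at h
  exact h.2

theorem pvKey_of_mem_flatMap (key : Int × Int → Int) (xs : List (Int × Int)) (L : List Int)
    (y : Int × Int) (h : y ∈ L.flatMap (pvFib key xs)) : key y ∈ L := by
  obtain ⟨k, hk, hy⟩ := List.mem_flatMap.1 h
  exact (pvKey_of_mem_fib key xs k y hy) ▸ hk

theorem pvFib_snoc (key : Int × Int → Int) (xs : List (Int × Int)) (x : Int × Int) (k : Int) :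
    pvFib key (xs ++ [x]) k = pvFib key xs k ++ (if key x = k then [x] else []) := by
  simp only [pvFib, List.filter_append, List.filter_cons, List.filter_nil]
  split <;> simp_all

theorem pvSorted_eq_flatMap_fib (key : Int × Int → Int) (xs : List (Int × Int)) (S : List Int)
    (hS : S.Pairwise (· < ·)) (hmem : ∀ k, k ∈ S ↔ ∃ a ∈ xs, key a = k) :
    PySem.List.sorted xs key false = S.flatMap (pvFib key xs) := by
  induction xs using List.reverseRecOn generalizing S with
  | nil =>
    have h1 : S.flatMap (pvFib key []) = [] :=
      List.flatMap_eq_nil_iff.2 (fun k _ => rfl)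
    rw [h1]
    simp [PySem.List.sorted_eq_nil_iff]
  | append_singleton xs x ih =>
    have hsplit : PySem.List.sorted (xs ++ [x]) key false =
        PySem.List.insertBy (fun a c => decide (key a < key c)) x (PySem.List.sorted xs key false) := by
      rw [PySem.List.sorted_eq_foldl_insertBy, PySem.List.sorted_eq_foldl_insertBy, List.foldl_append]
      rfl
    have hk0 : key x ∈ S := (hmem (key x)).2 ⟨x, by simp, rfl⟩
    obtain ⟨A, B, rfl⟩ := List.append_of_mem hk0
    have hpw := hS
    rw [List.pairwise_append] at hpw
    obtain ⟨hA, hk0B, hcross⟩ := hpw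
    rw [List.pairwise_cons] at hk0B
    obtain ⟨hkB, hB⟩ := hk0B
    have hAk : ∀ a ∈ A, a < key x := fun a ha => hcross a ha (key x) (by simp)
    -- fibers of the extended list
    have hfibA : ∀ k ∈ A, pvFib key (xs ++ [x]) k = pvFib key xs k := by
      intro k hkA
      rw [pvFib_snoc, if_neg (by exact fun he => absurd (he ▸ hAk k hkA) (lt_irrefl _)), List.append_nil]
    have hfibB : ∀ k ∈ B, pvFib key (xs ++ [x]) k = pvFib key xs k := by
      intro k hkB'
      rw [pvFib_snoc, if_neg (by exact fun he => absurd (he ▸ hkB k hkB') (lt_irrefl _)), List.append_nil]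
    have hfib0 : pvFib key (xs ++ [x]) (key x) = pvFib key xs (key x) ++ [x] := by
      rw [pvFib_snoc, if_pos rfl]
    by_cases hx0 : ∃ a ∈ xs, key a = key x
    · -- key x already occurs in xs: same key list S works for xs
      have hmem' : ∀ k, k ∈ A ++ key x :: B ↔ ∃ a ∈ xs, key a = k := by
        intro k
        constructor
        · intro hkS
          obtain ⟨a, ha, hka⟩ := (hmem k).1 hkS
          rcases List.mem_append.1 ha with ha | ha
          · exact ⟨a, ha, hka⟩
          · simp at ha
            subst ha
            exact hka ▸ hx0
        · intro ⟨a, ha, hka⟩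
          exact (hmem k).2 ⟨a, by simp [ha], hka⟩
      rw [hsplit, ih (A ++ key x :: B) hS hmem']
      rw [List.flatMap_append, List.flatMap_cons, List.flatMap_append, List.flatMap_cons]
      rw [← List.append_assoc, ← List.append_assoc]
      rw [pvInsertBy_split]
      · -- equality of remainders
        have h1 : (A.flatMap (pvFib key (xs ++ [x]))) = A.flatMap (pvFib key xs) :=
          List.flatMap_congr hfibA
        have h2 : (B.flatMap (pvFib key (xs ++ [x]))) = B.flatMap (pvFib key xs) :=
          List.flatMap_congr hfibB
        rw [h1, h2, hfib0]
        simp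
      · intro y hy
        rcases List.mem_append.1 hy with hy | hy
        · have := pvKey_of_mem_flatMap key xs A y hy
          simp only [decide_eq_false_iff_not, not_lt]
          exact le_of_lt (hAk _ this)
        · have := pvKey_of_mem_fib key xs (key x) y hy
          simp [this]
      · cases hQ : B.flatMap (pvFib key xs) with
        | nil => exact Or.inl rfl
        | cons q t =>
          refine Or.inr ⟨q, t, rfl, ?_⟩
          have hq : q ∈ B.flatMap (pvFib key xs) := by rw [hQ]; simp
          have := pvKey_of_mem_flatMap key xs B q hq
          simp [hkB _ this]
    · -- key x is fresh: use A ++ B for xs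
      have hsub : (A ++ B).Sublist (A ++ key x :: B) := by
        apply List.Sublist.append_left
        exact List.sublist_cons_self _ _
      have hS' : (A ++ B).Pairwise (· < ·) := hS.sublist hsub
      have hk0notA : key x ∉ A := fun h => absurd (hAk _ h) (lt_irrefl _)
      have hk0notB : key x ∉ B := fun h => absurd (hkB _ h) (lt_irrefl _)
      have hmem' : ∀ k, k ∈ A ++ B ↔ ∃ a ∈ xs, key a = k := by
        intro k
        constructor
        · intro hkS
          have hkne : k ≠ key x := by
            rintro rfl
            rcases List.mem_append.1 hkS with h | h
            · exact hk0notA h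
            · exact hk0notB h
          obtain ⟨a, ha, hka⟩ := (hmem k).1 (by
            rcases List.mem_append.1 hkS with h | h
            · exact List.mem_append.2 (Or.inl h)
            · exact List.mem_append.2 (Or.inr (by simp [h])))
          rcases List.mem_append.1 ha with ha | ha
          · exact ⟨a, ha, hka⟩
          · simp at ha
            subst ha
            exact absurd hka (Ne.symm hkne)
        · intro ⟨a, ha, hka⟩
          have : k ∈ A ++ key x :: B := (hmem k).2 ⟨a, by simp [ha], hka⟩
          have hkne : k ≠ key x := by
            rintro rfl
            exact hx0 ⟨a, ha, hka⟩
          rcases List.mem_append.1 this with h | h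
          · exact List.mem_append.2 (Or.inl h)
          · rcases List.mem_cons.1 h with h | h
            · exact absurd h hkne
            · exact List.mem_append.2 (Or.inr h)
      rw [hsplit, ih (A ++ B) hS' hmem', List.flatMap_append]
      rw [pvInsertBy_split]
      · have h1 : (A.flatMap (pvFib key (xs ++ [x]))) = A.flatMap (pvFib key xs) :=
          List.flatMap_congr hfibA
        have h2 : (B.flatMap (pvFib key (xs ++ [x]))) = B.flatMap (pvFib key xs) :=
          List.flatMap_congr hfibB
        have hfx : pvFib key xs (key x) = [] := by
          simp only [pvFib, List.filter_eq_nil_iff]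
          intro a ha
          simp only [beq_iff_eq]
          exact fun he => hx0 ⟨a, ha, he⟩
        rw [List.flatMap_append, List.flatMap_cons, h1, h2, hfib0, hfx]
        simp
      · intro y hy
        have := pvKey_of_mem_flatMap key xs A y hy
        simp only [decide_eq_false_iff_not, not_lt]
        exact le_of_lt (hAk _ this)
      · cases hQ : B.flatMap (pvFib key xs) with
        | nil => exact Or.inl rfl
        | cons q t =>
          refine Or.inr ⟨q, t, rfl, ?_⟩
          have hq : q ∈ B.flatMap (pvFib key xs) := by rw [hQ]; simp
          have := pvKey_of_mem_flatMap key xs B q hq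
          simp [hkB _ this]

theorem pvLoopA_cons (cp : List (Int × Int)) (fuel : Nat) (k : Int) (sd' : List Int)
    (d : PySem.Dict Int (List (Int × Int))) (ranked : List (Int × Int)) :
    pvLoopA cp (fuel + 1) (k :: sd') d ranked =
      (if ranked.length < 2 ∧ 0 < d.items.length then
        match d.get? k with
        | none => ranked
        | some bucket =>
          match bucket with
          | [] => ranked
          | n :: rest =>
            let ranked' := if n ∈ cp then ranked else ranked ++ [n]
            if rest.length = 0 then
              pvLoopA cp fuel ((PySem.List.remove? (k :: sd') k).getD (k :: sd'))
                (d.erase k) ranked'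
            else
              pvLoopA cp fuel (k :: sd') (d.insert k rest) ranked'
      else ranked) := rfl

theorem pvLoopA_step (cp : List (Int × Int)) (fuel : Nat) (k : Int) (sd' : List Int)
    (d : PySem.Dict Int (List (Int × Int))) (ranked : List (Int × Int)) (n : Int × Int)
    (rest : List (Int × Int)) (hget : d.get? k = some (n :: rest))
    (h : ranked.length < 2 ∧ 0 < d.items.length) :
    pvLoopA cp (fuel + 1) (k :: sd') d ranked =
      (if rest.length = 0 then
        pvLoopA cp fuel ((PySem.List.remove? (k :: sd') k).getD (k :: sd'))
          (d.erase k) (if n ∈ cp then ranked else ranked ++ [n])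
      else
        pvLoopA cp fuel (k :: sd') (d.insert k rest)
          (if n ∈ cp then ranked else ranked ++ [n])) := by
  rw [pvLoopA_cons, if_pos h, hget]

theorem pvLoopA_nil (cp : List (Int × Int)) (fuel : Nat)
    (d : PySem.Dict Int (List (Int × Int))) (ranked : List (Int × Int)) :
    pvLoopA cp (fuel + 1) [] d ranked = ranked := by
  rw [pvLoopA]
  split <;> rfl

theorem pvTake_shift (ranked F : List (Int × Int)) (n : Int × Int) (h : ranked.length < 2) :
    ranked ++ [n] ++ F.take (2 - (ranked ++ [n]).length) = ranked ++ (n :: F).take (2 - ranked.length) := by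
  have h0 : ranked.length = 0 ∨ ranked.length = 1 := by omega
  rcases h0 with h0 | h0 <;> simp [h0, List.take_succ_cons]

theorem pvLoopA_eq (cp : List (Int × Int)) (fuel : Nat) (sd : List Int)
    (d : PySem.Dict Int (List (Int × Int))) (ranked : List (Int × Int))
    (hnd : sd.Nodup)
    (hbk : ∀ k ∈ sd, ∃ b, d.get? k = some b ∧ b ≠ [])
    (hfuel : (pvFlatten sd d).length ≤ fuel) :
    pvLoopA cp fuel sd d ranked =
      ranked ++ ((pvFlatten sd d).filter (fun n => !decide (n ∈ cp))).take (2 - ranked.length) := by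
  induction fuel generalizing sd d ranked with
  | zero =>
    have : pvFlatten sd d = [] := List.eq_nil_of_length_eq_zero (by omega)
    simp [pvLoopA, this]
  | succ fuel ih =>
    by_cases hr : ranked.length < 2
    · cases sd with
      | nil =>
        simp [pvLoopA_nil, pvFlatten]
      | cons k sd' =>
        obtain ⟨b, hget, hb⟩ := hbk k (by simp)
        have hpos : 0 < d.items.length := pvItems_ne_nil_of_get? d k b hget
        cases b with
        | nil => exact absurd rfl hb
        | cons n rest =>
          rw [pvLoopA_step cp fuel k sd' d ranked n rest hget ⟨hr, hpos⟩]
          have hknotin : k ∉ sd' := by simp at hnd; exact fun h => (hnd.1 h).elim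
          have hflat : pvFlatten (k :: sd') d = n :: rest ++ pvFlatten sd' d := by
            simp [pvFlatten, PySem.Dict.getD, hget]
          by_cases hrest : rest.length = 0
          · have hrest' : rest = [] := List.eq_nil_of_length_eq_zero hrest
            subst hrest'
            rw [if_pos hrest, pvRemove?_cons_self]
            simp only [Option.getD_some]
            have hfe : pvFlatten sd' (d.erase k) = pvFlatten sd' d := by
              apply pvFlatten_congr
              intro k' hk'
              have hne : k' ≠ k := fun he => hknotin (he ▸ hk')
              simp [PySem.Dict.getD, pvGet?_erase_of_ne d k k' hne]
            have hbk' : ∀ k' ∈ sd', ∃ b, (d.erase k).get? k' = some b ∧ b ≠ [] := by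
              intro k' hk'
              have hne : k' ≠ k := fun he => hknotin (he ▸ hk')
              obtain ⟨b, hg, hb⟩ := hbk k' (by simp [hk'])
              exact ⟨b, by rw [pvGet?_erase_of_ne d k k' hne]; exact hg, hb⟩
            rw [ih sd' (d.erase k) _ (by simp at hnd; exact hnd.2) hbk' (by rw [hfe]; simp [hflat] at hfuel; omega)]
            rw [hfe, hflat]
            by_cases hn : n ∈ cp
            · simp [hn]
            · simpa [hn, List.filter_cons] using
                pvTake_shift ranked ((pvFlatten sd' d).filter (fun m => !decide (m ∈ cp))) n hr
          · rw [if_neg hrest]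
            have hbk' : ∀ k' ∈ (k :: sd'), ∃ b, (d.insert k rest).get? k' = some b ∧ b ≠ [] := by
              intro k' hk'
              rcases List.mem_cons.1 hk' with rfl | hk2
              · exact ⟨rest, PySem.Dict.get?_insert_self d k' rest, fun he => hrest (by simp [he])⟩
              · have hne : k' ≠ k := fun he => hknotin (he ▸ hk2)
                obtain ⟨b, hg, hb⟩ := hbk k' (by simp [hk2])
                exact ⟨b, by rw [PySem.Dict.get?_insert_of_ne d rest hne]; exact hg, hb⟩
            have hfi : pvFlatten (k :: sd') (d.insert k rest) = rest ++ pvFlatten sd' d := by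
              have h1 : pvFlatten sd' (d.insert k rest) = pvFlatten sd' d := by
                apply pvFlatten_congr
                intro k' hk'
                have hne : k' ≠ k := fun he => hknotin (he ▸ hk')
                simp [PySem.Dict.getD, PySem.Dict.get?_insert_of_ne d rest hne]
              simp [pvFlatten, PySem.Dict.getD, PySem.Dict.get?_insert_self] at h1 ⊢
              exact h1
            rw [ih (k :: sd') (d.insert k rest) _ hnd hbk' (by rw [hfi]; simp [hflat] at hfuel ⊢; omega)]
            rw [hfi, hflat]
            by_cases hn : n ∈ cp
            · simp [hn]
            · simpa [hn, List.filter_cons] using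
                pvTake_shift ranked ((rest ++ pvFlatten sd' d).filter (fun m => !decide (m ∈ cp))) n hr
    · have h2 : 2 - ranked.length = 0 := by omega
      cases sd with
      | nil => simp [pvLoopA_nil, h2]
      | cons k sd' => rw [pvLoopA_cons, if_neg (by omega)]; simp [h2]

theorem pvLoopB_eq (cp : List (Int × Int)) (L ranked : List (Int × Int)) (h : ranked.length < 2) :
    pvLoopB (PySem.Set.ofList cp) ranked L =
      ranked ++ (L.filter (fun n => !decide (n ∈ cp))).take (2 - ranked.length) := by
  induction L generalizing ranked with
  | nil => simp [pvLoopB]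
  | cons n rest ih =>
    have hc : PySem.Set.contains (PySem.Set.ofList cp) n = decide (n ∈ cp) := by
      by_cases hn : n ∈ cp
      · simp [hn, PySem.Set.mem_ofList]
      · simp only [hn, decide_false]
        by_contra hcon
        exact hn ((PySem.Set.mem_ofList _ _).1 ((PySem.Set.contains_iff _ _).1 (by simpa using hcon)))
    rw [pvLoopB, hc]
    by_cases hn : n ∈ cp
    · simp only [hn, decide_true, if_true, List.filter_cons, Bool.not_true]
      simpa using ih ranked h
    · simp only [hn, decide_false, Bool.not_false, List.filter_cons]
      by_cases h2 : ranked.length = 1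
      · simp [h2, List.take_succ_cons, List.length_append]
      · have h0 : ranked.length = 0 := by omega
        rw [if_neg (by simp)]
        rw [ih (ranked ++ [n]) (by simp [h0])]
        simp [h0, List.take_succ_cons]

-- ===== VERDICT (by name: the statement is the Claim_ definition above) =====
theorem rank_neighbors_spec : Claim_equal_rank_neighbors := by
  intro next_pos all_neighbors conflict_path _
  unfold Spec_rank_neighbors
  set key : Int × Int → Int := fun n => |next_pos.1 - n.1| + |next_pos.2 - n.2| with hkey
  set K : PySem.Set Int := PySem.Set.ofList (all_neighbors.map key) with hKdef
  have hbuild : pvBuildA next_pos all_neighbors = all_neighbors.foldl (pvStep key) PySem.Dict.empty := rfl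
  have hitems : (pvBuildA next_pos all_neighbors).items =
      K.map (fun k => (k, pvFib key all_neighbors k)) := by
    rw [hbuild]; exact pvBuild_items key all_neighbors
  have hkeys : (pvBuildA next_pos all_neighbors).keys = K := by
    simp [PySem.Dict.keys, hitems, List.map_map, Function.comp_def]
  set D := pvBuildA next_pos all_neighbors with hD
  set sd := PySem.List.sorted D.keys (fun k => k) false with hsd
  have hsdK : ∀ k, k ∈ sd ↔ k ∈ K := by
    intro k
    rw [hsd, PySem.List.mem_sorted, hkeys]
  have hndK : K.Nodup := PySem.Set.nodup_ofList _
  have hnd : sd.Nodup := ((PySem.List.sorted_perm D.keys (fun k => k) false).symm.nodup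
    (hkeys ▸ hndK))
  have hfibne : ∀ k ∈ sd, pvFib key all_neighbors k ≠ [] := by
    intro k hk
    obtain ⟨a, ha, hka⟩ := List.mem_map.1 ((PySem.Set.mem_ofList _ _).1 (hKdef ▸ (hsdK k).1 hk))
    intro hnil
    have : a ∈ pvFib key all_neighbors k := by
      simp [pvFib, List.mem_filter, ha, hka]
    rw [hnil] at this
    exact absurd this (List.not_mem_nil)
  have hget : ∀ k ∈ sd, D.get? k = some (pvFib key all_neighbors k) := by
    intro k hk
    exact pvGet?_of_items D K _ hitems hndK k ((hsdK k).1 hk)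
  have hbk : ∀ k ∈ sd, ∃ b, D.get? k = some b ∧ b ≠ [] :=
    fun k hk => ⟨pvFib key all_neighbors k, hget k hk, hfibne k hk⟩
  have hpw : sd.Pairwise (· < ·) := by
    have h1 : sd.Pairwise (· ≤ ·) := by
      simpa using PySem.List.sorted_pairwise D.keys (fun k => k)
    have h2 : sd.Pairwise (· ≠ ·) := hnd
    exact (h1.and h2).imp (fun h => lt_of_le_of_ne h.1 h.2)
  have hmemS : ∀ k, k ∈ sd ↔ ∃ a ∈ all_neighbors, key a = k := by
    intro k
    rw [hsdK, hKdef, PySem.Set.mem_ofList, List.mem_map]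
  have hflat : pvFlatten sd D = PySem.List.sorted all_neighbors key false := by
    have h1 : pvFlatten sd D = sd.flatMap (pvFib key all_neighbors) := by
      unfold pvFlatten
      apply List.flatMap_congr
      intro k hk
      simp [PySem.Dict.getD, hget k hk]
    rw [h1, ← pvSorted_eq_flatMap_fib key all_neighbors sd hpw hmemS]
  have hlen : (pvFlatten sd D).length ≤ all_neighbors.length := by
    rw [hflat]
    exact le_of_eq ((PySem.List.sorted_perm all_neighbors key false).length_eq)
  have hA : rank_neighbors next_pos all_neighbors conflict_path =
      ((PySem.List.sorted all_neighbors key false).filter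
        (fun n => !decide (n ∈ conflict_path))).take 2 := by
    show pvLoopA conflict_path all_neighbors.length sd D [] = _
    rw [pvLoopA_eq conflict_path all_neighbors.length sd D [] hnd hbk hlen, hflat]
    simp
  have hB : rank_neighbors_alt next_pos all_neighbors conflict_path =
      ((PySem.List.sorted all_neighbors key false).filter
        (fun n => !decide (n ∈ conflict_path))).take 2 := by
    show pvLoopB (PySem.Set.ofList conflict_path) [] (PySem.List.sorted all_neighbors key false) = _
    rw [pvLoopB_eq conflict_path (PySem.List.sorted all_neighbors key false) [] (by simp)]
    simp
  rw [hA, hB]
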